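-- pv_equiv track=rewrite | github.com/ChaeMyungSeock/deep_c- | deep_python/convnet_padhamsu_Pytorch.py | torch_pad
-- ===== SOURCE A (Python) =====
-- def torch_pad(image,kernel, stride, padding_size):
--     img_W = int(len(image)**0.5) # 4
--     kernel_size = int(len(kernel)**0.5)
--     stride = int(stride[0])
--     pad_num = 2*padding_size +img_W
--
--     pad_image = [0 for i in range((pad_num)**2)]
--     # 0으로 가득찬 초기 pad_image
--
--     pad_list = [ i  for i in range(pad_num) if i< padding_size or i>= img_W+padding_size]
--     # 원래 이미지를 제외한 패딩으로 둘러싸일 부분을 리스트 인덱스로 반환받아서 그부분은 처음에 선언한 0으로 그대로 pass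
--     # 패딩할 부분을 제외한 부분은 원래 이미지로 반환
--     for i in range(pad_num): # pad_img_len = img_W+pad
--         for j in range(pad_num):
--             if i in pad_list or j in pad_list:
--                 pass
--             else:
--                 pad_image[(pad_num) * i + j] = image[img_W * (i-padding_size) + (j-padding_size)]
--
--     return pad_image
-- ===== SOURCE B (Python) =====
-- def torch_pad(image, kernel, stride, padding_size):
--     img_W = int(len(image)**0.5)
--     kernel_size = int(len(kernel)**0.5)
--     stride = int(stride[0])
--     pad_num = 2*padding_size + img_W
--     side = [0]*padding_size
--     zero_row = [0]*pad_num
--     rows = ([zero_row]*padding_size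
--             + [side + image[r*img_W:(r+1)*img_W] + side for r in range(img_W)]
--             + [zero_row]*padding_size)
--     return [x for row in rows for x in row]
-- ===== Notes on version B (the rewrite author's own statement) =====
-- stated objective: simpler
-- what changed: Instead of pre-allocating a flat pad_num^2 array and scanning every grid cell with a membership test against a pad_list before writing in place, B builds the padded image declaratively as a list of rows (padding rows of zeros, then each source row slice wrapped in side zeros) and flattens it, with no mutation, no pad_list and no membership test.
-- outside the precondition, e.g. on torch_pad([1], [1], [1], -1): A returns [0], B returns [1]; on torch_pad([], [], [1], -1): A returns [0, 0, 0, 0], B returns []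
import Mathlib
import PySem

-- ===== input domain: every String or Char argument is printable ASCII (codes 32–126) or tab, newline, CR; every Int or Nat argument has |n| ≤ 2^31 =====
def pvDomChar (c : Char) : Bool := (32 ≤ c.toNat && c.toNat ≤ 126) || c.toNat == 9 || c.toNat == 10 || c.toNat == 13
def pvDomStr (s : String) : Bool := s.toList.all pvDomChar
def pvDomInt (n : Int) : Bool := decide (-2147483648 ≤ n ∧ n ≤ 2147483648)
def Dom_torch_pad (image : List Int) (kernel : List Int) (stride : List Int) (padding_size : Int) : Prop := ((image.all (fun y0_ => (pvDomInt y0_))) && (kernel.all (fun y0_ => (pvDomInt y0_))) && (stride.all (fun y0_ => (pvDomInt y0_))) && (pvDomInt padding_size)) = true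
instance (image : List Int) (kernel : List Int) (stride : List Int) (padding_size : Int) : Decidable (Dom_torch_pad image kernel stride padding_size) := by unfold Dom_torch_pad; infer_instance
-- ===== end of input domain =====

-- B builds the padded image as rows (zero rows, then each source-row slice wrapped in
-- side zeros) and flattens them, instead of scanning a pre-allocated flat grid with a
-- membership test against a pad_list and writing in place.

-- ===== PORT A =====
-- int(len(image)**0.5) ported as Nat.sqrt (floor square root): exact for every list
-- length reachable here (float sqrt is correctly rounded below 2^52).
-- stride[0] raises IndexError on [] — excluded by Pre_; under Pre_ pyGetD is exact.
def torch_pad (image : List Int) (kernel : List Int) (stride : List Int) (padding_size : Int) : List Int :=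
  let img_W : Int := (Nat.sqrt image.length : Int)
  let _kernel_size : Int := (Nat.sqrt kernel.length : Int)
  let _stride : Int := PySem.List.pyGetD stride 0 0
  let pad_num : Int := 2 * padding_size + img_W
  let pad_image : List Int := (PySem.List.pyRange 0 (pad_num ^ 2) 1).map (fun _ => 0)
  let pad_list : List Int := (PySem.List.pyRange 0 pad_num 1).filter
      (fun i => decide (i < padding_size) || decide (img_W + padding_size ≤ i))
  (PySem.List.pyRange 0 pad_num 1).foldl (fun pimg i =>
    (PySem.List.pyRange 0 pad_num 1).foldl (fun pimg j =>
      if i ∈ pad_list ∨ j ∈ pad_list then pimg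
      else PySem.List.pySetD pimg (pad_num * i + j)
             (PySem.List.pyGetD image (img_W * (i - padding_size) + (j - padding_size)) 0))
      pimg) pad_image

-- ===== PORT B =====
def torch_pad_alt (image : List Int) (kernel : List Int) (stride : List Int) (padding_size : Int) : List Int :=
  let img_W : Int := (Nat.sqrt image.length : Int)
  let _kernel_size : Int := (Nat.sqrt kernel.length : Int)
  let _stride : Int := PySem.List.pyGetD stride 0 0
  let pad_num : Int := 2 * padding_size + img_W
  let side : List Int := List.replicate padding_size.toNat 0
  let zero_row : List Int := List.replicate pad_num.toNat 0
  let rows : List (List Int) :=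
    List.replicate padding_size.toNat zero_row
      ++ (PySem.List.pyRange 0 img_W 1).map
          (fun r => side ++ PySem.List.slice image (some (r * img_W)) (some ((r + 1) * img_W)) ++ side)
      ++ List.replicate padding_size.toNat zero_row
  rows.flatMap (fun row => row)

-- ===== PRECONDITION & SPEC =====
-- Pre_ excludes empty stride (A raises IndexError on stride[0]) and negative
-- padding_size: there A's value (an accidental centre crop, or a pad_num² zero array
-- produced by squaring a negative pad_num) is an artefact of its pad_list arithmetic,
-- and B naturally returns the unpadded rows (or the empty list) instead.
def Pre_torch_pad (image : List Int) (kernel : List Int) (stride : List Int) (padding_size : Int) : Prop :=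
  stride ≠ [] ∧ 0 ≤ padding_size
instance (image : List Int) (kernel : List Int) (stride : List Int) (padding_size : Int) : Decidable (Pre_torch_pad image kernel stride padding_size) := by unfold Pre_torch_pad; infer_instance
def pvWitness_torch_pad : List Int × List Int × List Int × Int := ([1, 2, 3, 4], [1], [1], 1)
def Spec_torch_pad (image : List Int) (kernel : List Int) (stride : List Int) (padding_size : Int) (out : List Int) : Prop := out = torch_pad_alt image kernel stride padding_size
instance (image : List Int) (kernel : List Int) (stride : List Int) (padding_size : Int) (out : List Int) : Decidable (Spec_torch_pad image kernel stride padding_size out) := by unfold Spec_torch_pad; infer_instance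

-- ===== CLAIM (what is proved, stated in full; the proofs are below) =====
def Claim_equal_torch_pad : Prop := ∀ (image : List Int) (kernel : List Int) (stride : List Int) (padding_size : Int), Dom_torch_pad image kernel stride padding_size → Pre_torch_pad image kernel stride padding_size → Spec_torch_pad image kernel stride padding_size (torch_pad image kernel stride padding_size)

-- ===== LEMMAS AND PROOFS =====

-- [0 for i in range(m)] is m zeros
lemma map_zero_pyRange (m : Int) :
    (PySem.List.pyRange 0 m 1).map (fun _ => (0 : Int)) = List.replicate m.toNat 0 := by
  rw [PySem.List.pyRange_one]
  simp [Function.comp_def, List.map_const']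

-- the padded grid minus the pad border, as indices: [0,N) filtered to [p, W+p)
lemma filter_range_band (p W N : Int) (hp : 0 ≤ p) (hW : 0 ≤ W) (hN : N = 2 * p + W)
    (f : Int → Bool) (hf : ∀ x, 0 ≤ x → x < N → (f x = true ↔ (p ≤ x ∧ x < W + p))) :
    (PySem.List.pyRange 0 N 1).filter f = PySem.List.pyRange p (W + p) 1 := by
  rw [PySem.List.pyRange_one_append 0 p N (by omega) (by omega), List.filter_append,
      PySem.List.pyRange_one_append p (W + p) N (by omega) (by omega), List.filter_append]
  have h1 : (PySem.List.pyRange 0 p 1).filter f = [] := by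
    rw [List.filter_eq_nil_iff]
    intro x hx
    rw [PySem.List.mem_pyRange_one] at hx
    have := hf x (by omega) (by omega)
    simp only [Bool.not_eq_true]
    rcases Bool.eq_false_or_eq_true (f x) with h | h
    · exact absurd ((this.mp h).1) (by omega)
    · exact h
  have h2 : (PySem.List.pyRange p (W + p) 1).filter f = PySem.List.pyRange p (W + p) 1 := by
    rw [List.filter_eq_self]
    intro x hx
    rw [PySem.List.mem_pyRange_one] at hx
    exact (hf x (by omega) (by omega)).mpr (by omega)
  have h3 : (PySem.List.pyRange (W + p) N 1).filter f = [] := by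
    rw [List.filter_eq_nil_iff]
    intro x hx
    rw [PySem.List.mem_pyRange_one] at hx
    have := hf x (by omega) (by omega)
    simp only [Bool.not_eq_true]
    rcases Bool.eq_false_or_eq_true (f x) with h | h
    · exact absurd ((this.mp h).2) (by omega)
    · exact h
  rw [h1, h2, h3]
  simp

-- flattening m copies of an n-zero row is m*n zeros
lemma flatMap_replicate_zero (m n : Nat) :
    (List.replicate m (List.replicate n (0 : Int))).flatMap (fun row => row)
      = List.replicate (m * n) 0 := by
  induction m with
  | zero => simp
  | succ m ih =>
      rw [List.replicate_succ, List.flatMap_cons, ih, Nat.succ_mul, Nat.add_comm,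
        List.replicate_add]

-- setting the element right after a prefix
lemma set_at_prefix {α : Type} (l : List α) (a b : α) (r : List α) :
    (l ++ b :: r).set l.length a = l ++ a :: r := by
  induction l with
  | nil => rfl
  | cons x l ih => simp [ih]

-- writing a contiguous block of w cells starting right after `pre` replaces `mid`
lemma write_row : ∀ (mid : List Int) (g : Nat → Int) (pre suf : List Int) (base : Nat),
    base = pre.length →
    (List.range mid.length).foldl (fun pimg c => pimg.set (base + c) (g c)) (pre ++ (mid ++ suf))
      = pre ++ ((List.range mid.length).map g ++ suf) := by
  intro mid
  induction mid with
  | nil => intro g pre suf base _; simp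
  | cons x mid ih =>
      intro g pre suf base hb
      rw [List.length_cons, List.range_succ_eq_map, List.foldl_cons, List.foldl_map,
        Nat.add_zero, hb, List.cons_append, set_at_prefix pre (g 0) x (mid ++ suf)]
      have h1 : pre ++ g 0 :: (mid ++ suf) = (pre ++ [g 0]) ++ (mid ++ suf) := by simp
      rw [h1]
      have h2 : (List.range mid.length).foldl
          (fun pimg c => pimg.set (pre.length + (c + 1)) (g (c + 1))) ((pre ++ [g 0]) ++ (mid ++ suf))
          = (List.range mid.length).foldl
            (fun pimg c => pimg.set ((pre ++ [g 0]).length + c) ((fun c => g (c + 1)) c)) ((pre ++ [g 0]) ++ (mid ++ suf)) := by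
        apply PySem.List.foldl_congr_mem
        intro acc c _
        have : pre.length + (c + 1) = (pre ++ [g 0]).length + c := by simp; omega
        rw [this]
      rw [h2, ih (fun c => g (c + 1)) (pre ++ [g 0]) suf _ rfl]
      simp [List.map_map, Function.comp_def]

-- rows with constant length n flatten to (count)*n cells
lemma flatMap_length_const (n : Nat) : ∀ (L : List (List Int)),
    (∀ r ∈ L, r.length = n) → ((L.flatMap (fun row => row)).length = L.length * n) := by
  intro L
  induction L with
  | nil => intro _; simp
  | cons x L ih =>
      intro h
      rw [List.flatMap_cons, List.length_append, ih (fun r hr => h r (List.mem_cons_of_mem _ hr)),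
        h x List.mem_cons_self, List.length_cons, Nat.succ_mul, Nat.add_comm]

-- the full grid fill: writing each source row into the zero grid builds the row list
lemma fill_rows (g : Nat → Nat → Int) (w pn : Nat) :
    ∀ k, k ≤ w →
    (List.range k).foldl (fun acc r =>
        (List.range w).foldl (fun pimg c =>
          pimg.set ((w + 2 * pn) * (pn + r) + pn + c) (g r c)) acc)
      (List.replicate ((w + 2 * pn) * (w + 2 * pn)) (0 : Int))
    = ((List.replicate pn (List.replicate (w + 2 * pn) (0 : Int))
        ++ (List.range k).map (fun r =>
             List.replicate pn (0 : Int) ++ (List.range w).map (g r) ++ List.replicate pn 0)).flatMap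
        (fun row => row))
      ++ List.replicate ((w - k + pn) * (w + 2 * pn)) 0 := by
  intro k
  induction k with
  | zero =>
      intro _
      rw [List.range_zero, List.foldl_nil, List.map_nil, List.append_nil,
        flatMap_replicate_zero, ← List.replicate_add]
      congr 1
      have : w - 0 = w := by omega
      rw [this]
      ring_nf
  | succ k ih =>
      intro hk
      have hk' : k ≤ w := by omega
      obtain ⟨m, hm⟩ : ∃ m, w = k + 1 + m := ⟨w - (k + 1), by omega⟩
      rw [List.range_succ, List.foldl_append, List.foldl_cons, List.foldl_nil, ih hk']
      -- split the remaining zeros: pn side + w row cells + (pn + rest) tail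
      have hsplit : List.replicate ((w - k + pn) * (w + 2 * pn)) (0 : Int)
          = List.replicate pn 0 ++ (List.replicate w 0
              ++ (List.replicate pn 0 ++ List.replicate ((w - (k + 1) + pn) * (w + 2 * pn)) 0)) := by
        rw [← List.replicate_add, ← List.replicate_add, ← List.replicate_add]
        congr 1
        have h1 : w - k = m + 1 := by omega
        have h2 : w - (k + 1) = m := by omega
        rw [h1, h2, hm]
        ring
      rw [hsplit]
      set Dk := ((List.replicate pn (List.replicate (w + 2 * pn) (0 : Int))
          ++ (List.range k).map (fun r =>
               List.replicate pn (0 : Int) ++ (List.range w).map (g r) ++ List.replicate pn 0)).flatMap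
          (fun row => row)) with hDk
      have hlenDk : Dk.length = (pn + k) * (w + 2 * pn) := by
        rw [hDk, flatMap_length_const (w + 2 * pn)]
        · simp
        · intro r hr
          rw [List.mem_append] at hr
          rcases hr with hr | hr
          · rw [List.eq_of_mem_replicate hr]; simp
          · rw [List.mem_map] at hr
            obtain ⟨i, _, hi⟩ := hr
            rw [← hi]
            simp; omega
      have hpre : Dk ++ (List.replicate pn 0 ++ (List.replicate w 0
            ++ (List.replicate pn 0 ++ List.replicate ((w - (k + 1) + pn) * (w + 2 * pn)) 0)))
          = (Dk ++ List.replicate pn 0) ++ ((List.replicate w 0)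
            ++ (List.replicate pn 0 ++ List.replicate ((w - (k + 1) + pn) * (w + 2 * pn)) 0)) := by
        simp
      rw [hpre]
      have hbase : (w + 2 * pn) * (pn + k) + pn = (Dk ++ List.replicate pn (0 : Int)).length := by
        rw [List.length_append, hlenDk, List.length_replicate]
        ring
      have hfold : (List.range w).foldl (fun pimg c =>
            pimg.set ((w + 2 * pn) * (pn + k) + pn + c) (g k c))
            ((Dk ++ List.replicate pn 0) ++ ((List.replicate w 0)
              ++ (List.replicate pn 0 ++ List.replicate ((w - (k + 1) + pn) * (w + 2 * pn)) 0)))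
          = (Dk ++ List.replicate pn 0) ++ ((List.range w).map (g k)
              ++ (List.replicate pn 0 ++ List.replicate ((w - (k + 1) + pn) * (w + 2 * pn)) 0)) := by
        have := write_row (List.replicate (w:Nat) (0:Int)) (g k) (Dk ++ List.replicate pn 0)
          (List.replicate pn 0 ++ List.replicate ((w - (k + 1) + pn) * (w + 2 * pn)) 0)
          ((w + 2 * pn) * (pn + k) + pn) hbase
        rw [List.length_replicate] at this
        exact this
      rw [hfold, hDk]
      simp only [List.map_append, List.map_singleton, List.flatMap_append,
        List.flatMap_singleton, List.append_assoc]

-- a source-row slice as a map over column indices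
lemma take_drop_eq_map_range (img : List Int) (w r : Nat) (h : r * w + w ≤ img.length) :
    (img.drop (r * w)).take w = (List.range w).map (fun c => img.getD (w * r + c) 0) := by
  apply List.ext_getElem
  · rw [List.length_take, List.length_drop, List.length_map, List.length_range]; omega
  · intro i h1 h2
    rw [List.length_map, List.length_range] at h2
    have hlt : w * r + i < img.length := by rw [Nat.mul_comm]; omega
    simp only [List.getElem_take, List.getElem_drop, List.getElem_map, List.getElem_range,
      List.getD_eq_getElem?_getD, List.getElem?_eq_getElem hlt, Option.getD_some]
    congr 1
    ring

theorem torch_pad_spec : Claim_equal_torch_pad := by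
  intro image kernel stride padding_size _hdom hpre
  obtain ⟨_hs, hp0⟩ := hpre
  unfold Spec_torch_pad torch_pad torch_pad_alt
  dsimp only
  set W : Int := (Nat.sqrt image.length : Int) with hWdef
  set w : Nat := Nat.sqrt image.length with hwdef
  have hWw : W = (w : Int) := rfl
  have hW0 : 0 ≤ W := Int.natCast_nonneg _
  set p := padding_size with hpdef
  set pn : Nat := p.toNat with hpndef
  have hppn : p = (pn : Int) := by omega
  set N : Int := 2 * p + W with hNdef
  set n : Nat := w + 2 * pn with hndef
  have hNn : N = (n : Int) := by rw [hNdef, hndef, hWw, hppn]; push_cast; ring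
  have hwlen : w * w ≤ image.length := by
    have h := Nat.sqrt_le' image.length
    rw [pow_two] at h
    exact h
  rw [map_zero_pyRange]
  set padlist : List Int :=
      (PySem.List.pyRange 0 N 1).filter
        (fun i => decide (i < p) || decide (W + p ≤ i)) with hpl
  have hmem_pl : ∀ x : Int, x ∈ padlist ↔ (0 ≤ x ∧ x < N ∧ (x < p ∨ W + p ≤ x)) := by
    intro x
    simp only [hpl, List.mem_filter, PySem.List.mem_pyRange_one, Bool.or_eq_true,
      decide_eq_true_eq]
    tauto
  set S : List Int → Int → Int → List Int := fun pimg i j =>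
    PySem.List.pySetD pimg (N * i + j)
      (PySem.List.pyGetD image (W * (i - p) + (j - p)) 0) with hS
  have hband : ∀ f : Int → Bool, (∀ x, 0 ≤ x → x < N → (f x = true ↔ (p ≤ x ∧ x < W + p))) →
      (PySem.List.pyRange 0 N 1).filter f = PySem.List.pyRange p (W + p) 1 :=
    fun f hf => filter_range_band p W N hp0 hW0 hNdef f hf
  -- collapse A's guarded scan of the whole grid to a scan of the interior band
  have step1 : ∀ (acc : List Int) (i : Int), i ∈ PySem.List.pyRange 0 N 1 →
      (PySem.List.pyRange 0 N 1).foldl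
        (fun pimg j => if i ∈ padlist ∨ j ∈ padlist then pimg else S pimg i j) acc
      = (if p ≤ i ∧ i < W + p then
          (PySem.List.pyRange p (W + p) 1).foldl (fun pimg j => S pimg i j) acc
         else acc) := by
    intro acc i hi
    rw [PySem.List.mem_pyRange_one] at hi
    by_cases hin : p ≤ i ∧ i < W + p
    · rw [if_pos hin]
      have hnoti : i ∉ padlist := by rw [hmem_pl]; omega
      have t1 : (PySem.List.pyRange 0 N 1).foldl
          (fun pimg j => if i ∈ padlist ∨ j ∈ padlist then pimg else S pimg i j) acc
          = (PySem.List.pyRange 0 N 1).foldl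
              (fun pimg j => if ¬ j ∈ padlist then S pimg i j else pimg) acc :=
        PySem.List.foldl_congr_mem _ _ _ _
          (by intro a j _; by_cases hjp : j ∈ padlist <;> simp [hjp, hnoti])
      rw [t1, PySem.List.foldl_ite_eq_foldl_filter,
          hband _ (by intro x hx0 hxN; simp only [decide_eq_true_eq, hmem_pl]; omega)]
    · rw [if_neg hin]
      have hini : i ∈ padlist := by rw [hmem_pl]; omega
      have t1 : (PySem.List.pyRange 0 N 1).foldl
          (fun pimg j => if i ∈ padlist ∨ j ∈ padlist then pimg else S pimg i j) acc
          = (PySem.List.pyRange 0 N 1).foldl (fun pimg _ => pimg) acc :=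
        PySem.List.foldl_congr_mem _ _ _ _ (by intro a j _; simp [hini])
      rw [t1]
      exact PySem.List.foldl_ignore _ _
  have step2 : (PySem.List.pyRange 0 N 1).foldl
      (fun pimg i => (PySem.List.pyRange 0 N 1).foldl
        (fun pimg j => if i ∈ padlist ∨ j ∈ padlist then pimg else S pimg i j) pimg)
      (List.replicate (N ^ 2).toNat 0)
      = (PySem.List.pyRange 0 N 1).foldl
          (fun acc i => if p ≤ i ∧ i < W + p then
              (PySem.List.pyRange p (W + p) 1).foldl (fun pimg j => S pimg i j) acc
            else acc)
          (List.replicate (N ^ 2).toNat 0) :=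
    PySem.List.foldl_congr_mem _ _ _ _ (by intro acc i hi; exact step1 acc i hi)
  rw [step2, PySem.List.foldl_ite_eq_foldl_filter,
      hband _ (by intro x hx0 hxN; simp only [decide_eq_true_eq])]
  -- A is now a double fold over the interior band; reindex both folds to Nat ranges
  have hWp : W + p - p = W := by ring
  rw [PySem.List.pyRange_one p (W + p), hWp, PySem.List.pyRange_one 0 W]
  simp only [List.foldl_map, List.map_map, Int.sub_zero]
  have hNsq : (N ^ 2).toNat = n * n := by
    rw [hNn]; push_cast [sq]; omega
  have hWtoNat : W.toNat = w := by omega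
  rw [hNsq, hWtoNat]
  -- each A-write is a Nat set; each A-read is a Nat getD
  have hSred : ∀ (acc : List Int) (r c : Nat),
      S acc (p + (r : Int)) (p + (c : Int))
        = acc.set ((w + 2 * pn) * (pn + r) + pn + c) (image.getD (w * r + c) 0) := by
    intro acc r c
    rw [hS]
    dsimp only
    have e1 : N * (p + (r : Int)) + (p + (c : Int))
        = (((w + 2 * pn) * (pn + r) + pn + c : Nat) : Int) := by
      rw [hNn, hppn, hndef]; push_cast; ring
    have e2 : W * (p + (r : Int) - p) + (p + (c : Int) - p) = ((w * r + c : Nat) : Int) := by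
      rw [hWw]; push_cast; ring
    rw [e1, e2, PySem.List.pySetD_natCast, PySem.List.pyGetD_natCast]
  have hA : (List.range w).foldl (fun acc (r : Nat) =>
        (List.range w).foldl (fun pimg (c : Nat) => S pimg (p + (r : Int)) (p + (c : Int))) acc)
        (List.replicate (n * n) 0)
      = (List.range w).foldl (fun acc (r : Nat) =>
          (List.range w).foldl (fun pimg (c : Nat) =>
            pimg.set ((w + 2 * pn) * (pn + r) + pn + c) (image.getD (w * r + c) 0)) acc)
          (List.replicate ((w + 2 * pn) * (w + 2 * pn)) 0) := by
    rw [hndef]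
    apply PySem.List.foldl_congr_mem
    intro acc r _
    apply PySem.List.foldl_congr_mem
    intro a c _
    exact hSred a r c
  rw [hA, fill_rows (fun r c => image.getD (w * r + c) 0) w pn w le_rfl]
  -- now identify B's rows with the filled grid
  have hNtoNat : N.toNat = n := by omega
  rw [hNtoNat]
  have hrow : ∀ r : Nat, r < w →
      PySem.List.slice image (some ((r : Int) * W)) (some (((r : Int) + 1) * W))
        = (List.range w).map (fun c => image.getD (w * r + c) 0) := by
    intro r hr
    have e1 : (r : Int) * W = ((r * w : Nat) : Int) := by rw [hWw]; push_cast; ring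
    have e2 : ((r : Int) + 1) * W = ((r * w + w : Nat) : Int) := by rw [hWw]; push_cast; ring
    rw [e1, e2, PySem.List.slice_natCast]
    have e3 : r * w + w - r * w = w := by omega
    rw [e3, take_drop_eq_map_range image w r (by nlinarith)]
  have hww : w - w + pn = pn := by omega
  simp only [hww, hndef, List.flatMap_append, flatMap_replicate_zero, List.append_assoc]
  congr 2
  apply congrArg
  symm
  apply List.map_congr_left
  intro r hr
  rw [List.mem_range] at hr
  simp only [Function.comp_def, Int.zero_add]
  rw [hrow r hr]
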